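-- pv_equiv track=rewrite | github.com/acolorado1/7712-Module2_day3 | src/Graph_and_Traversal.py | startnodes_endnodes
-- ===== SOURCE A (Python) =====
-- def startnodes_endnodes(node_tuples):
--     # initiate temporary set of potential start nodes
--     temp_startnodes = set()
--     # initiate temporary set of potential end nodes
--     temp_endnodes = set()
--     # for every tuple of connected nodes
--     for pair in node_tuples:
--         # add x value to start node set
--         temp_startnodes.add(pair[0])
--         # add y value to end node set
--         temp_endnodes.add(pair[1])
--     # get difference between end node and start node sets to get true set of end nodes
--     end_set_difference = temp_endnodes - temp_startnodes
--     # get difference between star and end node sets to get true set of start nodes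
--     start_set_difference = temp_startnodes - temp_endnodes
--     # create dictionary of start and end nodes
--     start_end_dict = {"startnodes": start_set_difference, "endnodes": end_set_difference}
--     return start_end_dict
-- ===== SOURCE B (Python) =====
-- def startnodes_endnodes(node_tuples):
--     # brute force per endpoint: a node is a true start iff it never occurs as a
--     # destination anywhere in the edge list, and a true end iff it never occurs
--     # as a source; no intermediate sets are gathered or subtracted.
--     startnodes = {x for x, _ in node_tuples if all(x != d for _, d in node_tuples)}
--     endnodes = {y for _, y in node_tuples if all(y != s for s, _ in node_tuples)}
--     return {"startnodes": startnodes, "endnodes": endnodes}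
-- ===== Notes on version B (the rewrite author's own statement) =====
-- stated objective: simpler
-- what changed: B removes A's gathered source/dest sets and their set subtraction entirely: it classifies each edge endpoint directly with a brute-force scan of the edge list (a node is a true start iff it never occurs as a destination, and symmetrically), as two set comprehensions; this trades O(n) for O(n^2).
import Mathlib
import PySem

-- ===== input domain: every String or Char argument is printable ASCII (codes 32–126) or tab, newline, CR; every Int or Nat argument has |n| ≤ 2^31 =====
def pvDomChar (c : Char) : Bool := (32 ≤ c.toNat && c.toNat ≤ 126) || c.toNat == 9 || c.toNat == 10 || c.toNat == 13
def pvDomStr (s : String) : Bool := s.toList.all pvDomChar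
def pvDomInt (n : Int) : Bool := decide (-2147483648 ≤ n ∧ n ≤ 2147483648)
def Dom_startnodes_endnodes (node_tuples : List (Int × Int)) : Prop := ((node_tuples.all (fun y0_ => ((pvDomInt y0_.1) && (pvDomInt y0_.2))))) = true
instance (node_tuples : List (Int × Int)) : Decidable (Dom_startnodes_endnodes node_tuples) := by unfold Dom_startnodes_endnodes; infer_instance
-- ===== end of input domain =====

-- B drops A's gathered source/dest sets and set subtraction: it classifies each edge endpoint by a brute-force scan of the whole edge list (simpler decomposition, O(n^2) instead of O(n)).


-- ===== PORT A =====
def startnodes_endnodes (node_tuples : List (Int × Int)) : List (String × List Int) :=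
  -- temp_startnodes, temp_endnodes built in one loop over node_tuples
  let temps := node_tuples.foldl
    (fun (st : PySem.Set Int × PySem.Set Int) pair =>
      (PySem.Set.add st.1 pair.1, PySem.Set.add st.2 pair.2))
    (PySem.Set.empty, PySem.Set.empty)
  let end_set_difference := PySem.Set.diff temps.2 temps.1
  let start_set_difference := PySem.Set.diff temps.1 temps.2
  [("startnodes", start_set_difference), ("endnodes", end_set_difference)]

-- ===== PORT B =====
def startnodes_endnodes_alt (node_tuples : List (Int × Int)) : List (String × List Int) :=
  -- {x for x, _ in node_tuples if all(x != d for _, d in node_tuples)}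
  let startnodes := node_tuples.foldl
    (fun (s : PySem.Set Int) p =>
      if node_tuples.all (fun q => p.1 != q.2) then PySem.Set.add s p.1 else s)
    PySem.Set.empty
  -- {y for _, y in node_tuples if all(y != s for s, _ in node_tuples)}
  let endnodes := node_tuples.foldl
    (fun (s : PySem.Set Int) p =>
      if node_tuples.all (fun q => p.2 != q.1) then PySem.Set.add s p.2 else s)
    PySem.Set.empty
  [("startnodes", startnodes), ("endnodes", endnodes)]

-- ===== PRECONDITION & SPEC =====
def Spec_startnodes_endnodes (node_tuples : List (Int × Int)) (out : List (String × List Int)) : Prop := out = startnodes_endnodes_alt node_tuples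
instance (node_tuples : List (Int × Int)) (out : List (String × List Int)) : Decidable (Spec_startnodes_endnodes node_tuples out) := by unfold Spec_startnodes_endnodes; infer_instance

-- ===== CLAIM (what is proved, stated in full; the proofs are below) =====
def Claim_equal_startnodes_endnodes : Prop := ∀ (node_tuples : List (Int × Int)), Dom_startnodes_endnodes node_tuples → Spec_startnodes_endnodes node_tuples (startnodes_endnodes node_tuples)

-- ===== LEMMAS AND PROOFS =====

-- B's comprehension loop: conditionally adding f p for each p is updating with the filtered, mapped list
theorem pv_foldl_if_add (c : Int × Int → Bool) (f : Int × Int → Int)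
    (l : List (Int × Int)) (s : PySem.Set Int) :
    l.foldl (fun s p => if c p then PySem.Set.add s (f p) else s) s =
      PySem.Set.update s ((l.filter c).map f) := by
  induction l generalizing s with
  | nil => simp [PySem.Set.update_nil]
  | cons p r ih =>
    rw [List.foldl_cons, List.filter_cons]
    by_cases hc : c p = true
    · simp [hc, ih, PySem.Set.update_cons]
    · simp [hc, ih]

-- filtering commutes with discard
theorem pv_filter_discard (p : Int → Bool) (s : PySem.Set Int) (x : Int) :
    (PySem.Set.discard s x).filter p = PySem.Set.discard (s.filter p) x := by
  simp [PySem.Set.discard, List.filter_filter]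
  congr 1
  funext y
  cases p y <;> simp

-- filtering commutes with first-occurrence dedup
theorem pv_filter_ofList (p : Int → Bool) (l : List Int) :
    (PySem.Set.ofList l).filter p = PySem.Set.ofList (l.filter p) := by
  induction l with
  | nil => rfl
  | cons x xs ih =>
    rw [PySem.Set.ofList_cons, List.filter_cons]
    by_cases hp : p x = true
    · simp [hp, PySem.Set.ofList_cons, pv_filter_discard, ih]
    · simp only [Bool.not_eq_true] at hp
      rw [List.filter_cons_of_neg (by simp [hp]), pv_filter_discard, ih]
      have hx : x ∉ PySem.Set.ofList (List.filter p xs) := by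
        intro hmem
        have h1 := (PySem.Set.mem_ofList _ _).1 hmem
        have h2 := List.of_mem_filter h1
        simp [hp] at h2
      rw [PySem.Set.discard]
      rw [if_neg (by simp [hp])]
      apply List.filter_eq_self.mpr
      intro a ha
      by_cases hax : a = x
      · exact absurd (hax ▸ ha) hx
      · simp [hax]

-- "x not in set(l.map g)" is exactly B's inner all-scan over l
theorem pv_not_contains_eq_all (l : List (Int × Int)) (g : Int × Int → Int) (x : Int) :
    (!(PySem.Set.ofList (l.map g)).contains x) = l.all (fun q => x != g q) := by
  by_cases h : x ∈ l.map g
  · have hc : (PySem.Set.ofList (l.map g)).contains x = true :=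
      (PySem.Set.contains_iff _ _).2 ((PySem.Set.mem_ofList _ _).2 h)
    rcases List.mem_map.1 h with ⟨q, hq, hgx⟩
    have : l.all (fun q => x != g q) = false := by
      refine List.all_eq_false.2 ⟨q, hq, ?_⟩
      simp [hgx]
    rw [hc, this]
    rfl
  · have hc : (PySem.Set.ofList (l.map g)).contains x = false := by
      by_contra hcc
      have : (PySem.Set.ofList (l.map g)).contains x = true := by
        cases hh : (PySem.Set.ofList (l.map g)).contains x
        · exact absurd hh hcc
        · rfl
      exact h ((PySem.Set.mem_ofList _ _).1 ((PySem.Set.contains_iff _ _).1 this))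
    have ha : l.all (fun q => x != g q) = true := by
      refine List.all_eq_true.2 (fun q hq => ?_)
      have : g q ∈ l.map g := List.mem_map_of_mem hq
      have hne : x ≠ g q := fun he => h (he ▸ this)
      simp [hne]
    rw [hc, ha]
    rfl

-- A's set difference of the two gathered sets = B's comprehension result (for either orientation)
theorem pv_diff_eq_comprehension (l : List (Int × Int)) (f g : Int × Int → Int) :
    PySem.Set.diff (PySem.Set.ofList (l.map f)) (PySem.Set.ofList (l.map g)) =
      PySem.Set.ofList ((l.filter (fun p => l.all (fun q => f p != g q))).map f) := by
  show (PySem.Set.ofList (l.map f)).filter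
      (fun x => !(PySem.Set.ofList (l.map g)).contains x) = _
  rw [pv_filter_ofList, List.filter_map]
  congr 2
  apply List.filter_congr
  intro p _
  exact pv_not_contains_eq_all l g (f p)

-- ===== VERDICT (by name: the statement is the Claim_ definition above) =====
theorem startnodes_endnodes_spec : Claim_equal_startnodes_endnodes := by
  intro nts _
  unfold Spec_startnodes_endnodes startnodes_endnodes startnodes_endnodes_alt
  dsimp only
  -- A's one loop building both sets is two ofList's
  rw [PySem.List.foldl_prod_mk (f := fun s (e : Int × Int) => PySem.Set.add s e.1)
    (g := fun s (e : Int × Int) => PySem.Set.add s e.2),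
    ← PySem.Set.update_map_eq_foldl_add nts (·.1) PySem.Set.empty,
    ← PySem.Set.update_map_eq_foldl_add nts (·.2) PySem.Set.empty]
  simp only [PySem.Set.update_empty]
  -- B's two comprehension loops are ofList's of filtered projections
  rw [pv_foldl_if_add (fun p => nts.all (fun q => p.1 != q.2)) (·.1) nts PySem.Set.empty,
    pv_foldl_if_add (fun p => nts.all (fun q => p.2 != q.1)) (·.2) nts PySem.Set.empty]
  simp only [PySem.Set.update_empty]
  rw [pv_diff_eq_comprehension nts (·.1) (·.2), pv_diff_eq_comprehension nts (·.2) (·.1)]
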